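-- pv_equiv track=rewrite | github.com/pitlover/JiCoding | Backjun/Practice/Greedy/5430.py | solution
-- ===== SOURCE A (Python) =====
-- from collections import deque
--
-- def solution(p, numbers):
--     p = list(p)
--     direction = 1 # D -> p[1:]
--     numbers = deque(numbers)
--     for a in p:
--         if a == "R":
--             direction *= -1
--         else:
--             if len(numbers) == 0 or numbers[0] == '':
--                 return "error"
--             if direction == 1:
--                 numbers.popleft()
--             else:
--                 numbers.pop()
--     if direction == -1:
--         numbers.reverse()
--
--     return "[" + ",".join(numbers) + "]"
-- ===== SOURCE B (Python) =====
-- def solution(p, numbers):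
--     lo, hi, sign = 0, len(numbers), 1
--     for a in p:
--         if a == "R":
--             sign = -sign
--         elif lo == hi or numbers[lo] == '':
--             return "error"
--         elif sign == 1:
--             lo += 1
--         else:
--             hi -= 1
--     mid = numbers[lo:hi]
--     if sign == -1:
--         mid.reverse()
--     return "[" + ",".join(mid) + "]"
-- ===== Notes on version B (the rewrite author's own statement) =====
-- stated objective: simpler
-- what changed: B replaces A's deque mutation (popleft/pop per D command, then deque reverse) with two integer pointers advanced over the commands and a single slice of the untouched input list at the end.
import Mathlib
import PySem

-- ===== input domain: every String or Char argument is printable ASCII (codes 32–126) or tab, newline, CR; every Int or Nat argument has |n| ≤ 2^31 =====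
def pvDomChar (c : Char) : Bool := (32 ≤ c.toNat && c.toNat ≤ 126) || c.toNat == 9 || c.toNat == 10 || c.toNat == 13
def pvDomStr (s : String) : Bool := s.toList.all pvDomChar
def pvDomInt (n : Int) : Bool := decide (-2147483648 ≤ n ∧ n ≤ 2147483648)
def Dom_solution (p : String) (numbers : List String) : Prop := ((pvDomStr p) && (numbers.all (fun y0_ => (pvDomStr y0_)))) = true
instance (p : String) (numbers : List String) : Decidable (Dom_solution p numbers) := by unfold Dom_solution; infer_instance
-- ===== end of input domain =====

-- B replaces A's deque mutation with two integer pointers and one final slice; objective: simpler.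

-- ===== PORT A =====
-- A's for-loop over p, mutating the deque; none = the early 'return "error"'.
def solLoopA : List Char → Int → List String → Option (Int × List String)
  | [], direction, q => some (direction, q)
  | a :: rest, direction, q =>
    if a = 'R' then solLoopA rest (direction * -1) q
    else
      match q with
      | [] => none
      | x :: xs => if x = "" then none
          else if direction = 1 then solLoopA rest direction xs
          else solLoopA rest direction (x :: xs).dropLast

def solution (p : String) (numbers : List String) : String :=
  match solLoopA p.toList 1 numbers with
  | none => "error"
  | some (direction, q) =>
      let q := if direction = -1 then q.reverse else q
      "[" ++ PySem.Str.join "," q ++ "]"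

-- ===== PORT B =====
-- B's for-loop over p, advancing the two pointers; none = the early 'return "error"'.
def solLoopB (numbers : List String) : List Char → Int → Int → Int → Option (Int × Int × Int)
  | [], lo, hi, sign => some (lo, hi, sign)
  | a :: rest, lo, hi, sign =>
    if a = 'R' then solLoopB numbers rest lo hi (-sign)
    else if lo = hi ∨ PySem.List.pyGetD numbers lo "" = "" then none
    else if sign = 1 then solLoopB numbers rest (lo + 1) hi sign
    else solLoopB numbers rest lo (hi - 1) sign

def solution_alt (p : String) (numbers : List String) : String :=
  match solLoopB numbers p.toList 0 (numbers.length : Int) 1 with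
  | none => "error"
  | some (lo, hi, sign) =>
      let mid := PySem.List.slice numbers (some lo) (some hi)
      let mid := if sign = -1 then mid.reverse else mid
      "[" ++ PySem.Str.join "," mid ++ "]"

-- ===== PRECONDITION & SPEC =====
def Spec_solution (p : String) (numbers : List String) (out : String) : Prop := out = solution_alt p numbers
instance (p : String) (numbers : List String) (out : String) : Decidable (Spec_solution p numbers out) := by unfold Spec_solution; infer_instance

-- ===== CLAIM (what is proved, stated in full; the proofs are below) =====
def Claim_equal_solution : Prop := ∀ (p : String) (numbers : List String), Dom_solution p numbers → Spec_solution p numbers (solution p numbers)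

-- ===== LEMMAS AND PROOFS =====

-- Main invariant: A's deque after a prefix of commands is the slice numbers[f:h] tracked by B's pointers.
lemma loop_agree (cs : List Char) (numbers : List String) (direction : Int)
    (f h : Nat) (hfh : f ≤ h) (hh : h ≤ numbers.length) :
    solLoopA cs direction (PySem.List.slice numbers (some (f : Int)) (some (h : Int))) =
      (solLoopB numbers cs (f : Int) (h : Int) direction).map
        (fun s => (s.2.2, PySem.List.slice numbers (some s.1) (some s.2.1))) := by
  induction cs generalizing direction f h with
  | nil => simp [solLoopA, solLoopB]
  | cons a rest ih =>
    by_cases hR : a = 'R'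
    · have hneg : direction * -1 = -direction := by ring
      simp only [solLoopA, solLoopB, if_pos hR, hneg]
      exact ih (-direction) f h hfh hh
    · by_cases hfhe : f = h
      · subst hfhe
        have hseg : PySem.List.slice numbers (some (f : Int)) (some (f : Int)) = [] := by
          rw [PySem.List.slice_natCast]; simp
        simp [solLoopA, solLoopB, hR, hseg]
      · have hflt : f < h := lt_of_le_of_ne hfh hfhe
        have hflen : f < numbers.length := lt_of_lt_of_le hflt hh
        have hcast : ((f : Int) + 1) = ((f + 1 : Nat) : Int) := by push_cast; ring
        have hseg : PySem.List.slice numbers (some (f : Int)) (some (h : Int)) =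
            numbers[f] :: PySem.List.slice numbers (some ((f + 1 : Nat) : Int)) (some (h : Int)) := by
          rw [PySem.List.slice_natCast, PySem.List.slice_natCast,
            List.drop_eq_getElem_cons hflen]
          obtain ⟨k, hk⟩ : ∃ k, h - f = k + 1 := ⟨h - f - 1, by omega⟩
          rw [hk, List.take_succ_cons]
          have : h - (f + 1) = k := by omega
          rw [this]
        have hget : PySem.List.pyGetD numbers (f : Int) "" = numbers[f] := by
          rw [PySem.List.pyGetD_natCast]
          exact List.getD_eq_getElem numbers "" hflen
        by_cases hx : numbers[f] = ""
        · simp [solLoopA, solLoopB, hR, hseg, hget, hx]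
        · have hlohi : ¬ ((f : Int) = (h : Int) ∨ PySem.List.pyGetD numbers (f : Int) "" = "") := by
            rw [hget]
            rintro (hc | hc)
            · exact hfhe (by exact_mod_cast hc)
            · exact hx hc
          by_cases hd : direction = 1
          · simp only [solLoopA, solLoopB, if_neg hR, hseg, if_neg hx, if_pos hd, if_neg hlohi]
            rw [hcast]
            exact ih direction (f + 1) h (by omega) hh
          · have hdl : (numbers[f] :: PySem.List.slice numbers (some ((f + 1 : Nat) : Int)) (some (h : Int))).dropLast
                = PySem.List.slice numbers (some (f : Int)) (some ((h - 1 : Nat) : Int)) := by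
              rw [← hseg, PySem.List.slice_natCast, PySem.List.slice_natCast,
                List.dropLast_eq_take, List.take_take]
              have hlen : ((numbers.drop f).take (h - f)).length = h - f := by
                simp; omega
              rw [hlen]
              congr 1
              omega
            have hcast2 : ((h : Int) - 1) = ((h - 1 : Nat) : Int) := by omega
            simp only [solLoopA, solLoopB, if_neg hR, hseg, if_neg hx, if_neg hd, if_neg hlohi, hdl, hcast2]
            exact ih direction f (h - 1) (by omega) (by omega)

theorem solution_spec : Claim_equal_solution := by
  intro p numbers _
  unfold Spec_solution solution solution_alt
  have h0 : PySem.List.slice numbers (some ((0 : Nat) : Int)) (some ((numbers.length : Nat) : Int)) = numbers := by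
    rw [PySem.List.slice_natCast]; simp
  have := loop_agree p.toList numbers 1 0 numbers.length (by omega) (le_refl _)
  rw [h0] at this
  simp only [Nat.cast_zero] at this
  rw [this]
  cases solLoopB numbers p.toList 0 (numbers.length : Int) 1 with
  | none => rfl
  | some s => rfl
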